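-- pv_equiv track=rewrite | github.com/atomicbomber-git/malay-sampa-code-generator | syllable.py | split_by_consecutive_consonants
-- ===== SOURCE A (Python) =====
-- CONSONANTS = 'bcdfghjklmnpqrstvwxyz!#$%^/+=*,?'
--
-- def split_by_consecutive_consonants(part):
--     result = []
--     temp = ""
--
--     for i, char in enumerate(part):
--
--         temp += char
--
--         if (i + 1 >= len(part)):
--             result.append(temp)
--             break
--
--         if (part[i] in CONSONANTS and part[i + 1] in CONSONANTS):
--             result.append(temp)
--             temp = ""
--
--     return result
-- ===== SOURCE B (Python) =====
-- CONSONANTS = 'bcdfghjklmnpqrstvwxyz!#$%^/+=*,?'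
--
-- def split_by_consecutive_consonants(part):
--     if not part:
--         return []
--     cuts = [i for i, (x, y) in enumerate(zip(part, part[1:]))
--             if x in CONSONANTS and y in CONSONANTS]
--     segments = []
--     start = 0
--     for c in cuts:
--         segments.append(part[start:c + 1])
--         start = c + 1
--     segments.append(part[start:])
--     return segments
-- ===== Notes on version B (the rewrite author's own statement) =====
-- stated objective: alternative
-- what changed: B first computes the list of cut indices (positions of consonant-consonant pairs) in one zip pass, then slices the string at those boundaries in a second pass, instead of A's single pass that accumulates a temp string character by character.
import Mathlib
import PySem

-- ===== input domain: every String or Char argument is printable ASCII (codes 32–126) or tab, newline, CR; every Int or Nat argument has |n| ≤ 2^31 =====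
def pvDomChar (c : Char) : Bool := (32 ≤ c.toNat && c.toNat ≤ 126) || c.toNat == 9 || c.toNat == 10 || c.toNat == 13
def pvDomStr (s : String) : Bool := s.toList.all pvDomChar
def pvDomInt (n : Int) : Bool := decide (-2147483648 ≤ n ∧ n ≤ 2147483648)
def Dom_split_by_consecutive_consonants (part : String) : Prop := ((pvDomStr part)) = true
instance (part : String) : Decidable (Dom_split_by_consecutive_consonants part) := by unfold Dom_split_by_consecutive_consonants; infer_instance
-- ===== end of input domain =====

-- B computes the consonant-consonant cut indices in one zip pass and then slices the
-- string at those boundaries, instead of accumulating a temp string char by char (objective: alternative).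

def pvConsonants : List Char := "bcdfghjklmnpqrstvwxyz!#$%^/+=*,?".toList

-- ===== PORT A =====
-- for i, char in enumerate(part): temp += char; break-append at the last index; split after a consonant pair
def pvGoA (part : List Char) : Nat → List Char → List Char → List String
  | _, _, [] => []
  | i, temp, c :: rest =>
    if part.length ≤ i + 1 then
      [String.ofList (temp ++ [c])]
    else if pvConsonants.contains c && (match rest with | d :: _ => pvConsonants.contains d | [] => false) then
      String.ofList (temp ++ [c]) :: pvGoA part (i + 1) [] rest
    else
      pvGoA part (i + 1) (temp ++ [c]) rest

def split_by_consecutive_consonants (part : String) : List String :=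
  pvGoA part.toList 0 [] part.toList

-- ===== PORT B =====
-- cuts = [i for i, (x, y) in enumerate(zip(part, part[1:])) if x in CONSONANTS and y in CONSONANTS]
def pvCuts (l : List Char) : List Nat :=
  (((l.zip l.tail).zipIdx).filter
    (fun p => pvConsonants.contains p.1.1 && pvConsonants.contains p.1.2)).map (·.2)

-- second pass: for c in cuts: append part[start:c+1]; start = c+1; finally append part[start:]
def pvSegs (l : List Char) : Nat → List Nat → List String
  | start, [] => [String.ofList (PySem.List.slice l (some (start : Int)) none)]
  | start, c :: cs =>
      String.ofList (PySem.List.slice l (some (start : Int)) (some ((c : Int) + 1))) ::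
        pvSegs l (c + 1) cs

def split_by_consecutive_consonants_alt (part : String) : List String :=
  if part.toList = [] then [] else pvSegs part.toList 0 (pvCuts part.toList)

-- ===== PRECONDITION & SPEC =====
def Spec_split_by_consecutive_consonants (part : String) (out : List String) : Prop := out = split_by_consecutive_consonants_alt part
instance (part : String) (out : List String) : Decidable (Spec_split_by_consecutive_consonants part out) := by unfold Spec_split_by_consecutive_consonants; infer_instance

-- ===== CLAIM (what is proved, stated in full; the proofs are below) =====
def Claim_equal_split_by_consecutive_consonants : Prop := ∀ (part : String), Dom_split_by_consecutive_consonants part → Spec_split_by_consecutive_consonants part (split_by_consecutive_consonants part)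

-- ===== LEMMAS AND PROOFS =====

-- reference decomposition: the list of segments as lists of chars
def pvF : List Char → List (List Char)
  | [] => []
  | [c] => [[c]]
  | c :: d :: rest =>
    if pvConsonants.contains c && pvConsonants.contains d then
      [c] :: pvF (d :: rest)
    else
      match pvF (d :: rest) with
      | [] => [[c]]
      | h :: t => (c :: h) :: t

-- cut indices with an explicit starting offset
def pvCutsF : List Char → Nat → List Nat
  | c :: d :: rest, k =>
      (if pvConsonants.contains c && pvConsonants.contains d then [k] else []) ++
        pvCutsF (d :: rest) (k + 1)
  | _, _ => []

theorem pvF_ne_nil (l : List Char) (h : l ≠ []) : pvF l ≠ [] := by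
  match l with
  | [] => exact absurd rfl h
  | [c] => simp [pvF]
  | c :: d :: rest =>
    simp only [pvF]
    split
    · simp
    · split <;> simp

theorem pvF_cons_exists (d : Char) (rest : List Char) :
    ∃ h t, pvF (d :: rest) = h :: t := by
  rcases hq : pvF (d :: rest) with _ | ⟨h, t⟩
  · exact absurd hq (pvF_ne_nil _ (by simp))
  · exact ⟨h, t, rfl⟩

theorem pvCuts_eq_aux (l : List Char) : ∀ k,
    (((l.zip l.tail).zipIdx k).filter
      (fun p => pvConsonants.contains p.1.1 && pvConsonants.contains p.1.2)).map (·.2)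
    = pvCutsF l k := by
  induction l with
  | nil => intro k; simp [pvCutsF]
  | cons c l' ih =>
    intro k
    cases l' with
    | nil => simp [pvCutsF]
    | cons d rest =>
      have := ih (k + 1)
      by_cases hp : (pvConsonants.contains c && pvConsonants.contains d) = true
      · simp only [pvCutsF, hp, if_true, List.singleton_append, List.tail_cons,
          List.zip_cons_cons, List.zipIdx_cons, List.filter_cons] at this ⊢
        simp_all
      · simp only [pvCutsF, hp, List.nil_append, List.tail_cons, Bool.false_eq_true, if_false,
          List.zip_cons_cons, List.zipIdx_cons, List.filter_cons] at this ⊢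
        simp_all
      
theorem pvCutsF_ge (l : List Char) : ∀ k x, x ∈ pvCutsF l k → k ≤ x := by
  induction l with
  | nil => intro k x hx; simp [pvCutsF] at hx
  | cons c l' ih =>
    intro k x hx
    cases l' with
    | nil => simp [pvCutsF] at hx
    | cons d rest =>
      simp only [pvCutsF, List.mem_append] at hx
      rcases hx with hx | hx
      · split at hx <;> simp_all
      · exact Nat.le_of_succ_le (ih (k + 1) x hx)

theorem pvGoA_eq (l : List Char) : ∀ (part : List Char) (i : Nat) (temp h : List Char)
    (t : List (List Char)), part.length = i + l.length → pvF l = h :: t →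
    pvGoA part i temp l = String.ofList (temp ++ h) :: t.map String.ofList := by
  induction l with
  | nil => intro part i temp h t _ hf; simp [pvF] at hf
  | cons c l' ih =>
    intro part i temp h t hlen hf
    cases l' with
    | nil =>
      have hfc : pvF [c] = [[c]] := by simp [pvF]
      rw [hfc] at hf; cases hf
      simp [pvGoA, hlen]
    | cons d rest =>
      have hlt : ¬ part.length ≤ i + 1 := by simp at hlen ⊢; omega
      obtain ⟨h', t', hft⟩ := pvF_cons_exists d rest
      by_cases hp : (pvConsonants.contains c && pvConsonants.contains d) = true
      · have hfc : pvF (c :: d :: rest) = [c] :: h' :: t' := by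
          simp only [pvF, hp, if_true, hft]
        rw [hfc] at hf; cases hf
        rw [pvGoA, if_neg hlt, if_pos hp,
          ih part (i + 1) [] h' t' (by simp at hlen ⊢; omega) hft]
        simp
      · have hfc : pvF (c :: d :: rest) = (c :: h') :: t' := by
          have hp' : (pvConsonants.contains c && pvConsonants.contains d) = false := by
            simpa using hp
          simp only [pvF, hp', Bool.false_eq_true, if_false, hft]
        rw [hfc] at hf; cases hf
        rw [pvGoA, if_neg hlt, if_neg hp,
          ih part (i + 1) (temp ++ [c]) h' t (by simp at hlen ⊢; omega) hft]
        simp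

theorem pvSegs_shift (l : List Char) (k : Nat) (c : Char) (cs : List Nat)
    (hd : l.drop k = c :: l.drop (k + 1)) (hcs : ∀ x ∈ cs, k + 1 ≤ x)
    (s : List Char) (ss : List String)
    (h : pvSegs l (k + 1) cs = String.ofList s :: ss) :
    pvSegs l k cs = String.ofList (c :: s) :: ss := by
  cases cs with
  | nil =>
    simp only [pvSegs, PySem.List.slice_from_natCast, List.cons.injEq,
      String.ofList_inj] at h ⊢
    obtain ⟨hs, hss⟩ := h
    exact ⟨by rw [hd, hs], hss⟩
  | cons c1 cs' =>
    have hk : k + 1 ≤ c1 := hcs c1 (by simp)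
    simp only [pvSegs] at h ⊢
    have hc1 : ((c1 : Int) + 1) = ((c1 + 1 : Nat) : Int) := by push_cast; ring
    rw [hc1, PySem.List.slice_natCast] at h ⊢
    simp only [List.cons.injEq, String.ofList_inj] at h ⊢
    obtain ⟨hs, hss⟩ := h
    refine ⟨?_, hss⟩
    rw [hd, show c1 + 1 - k = (c1 + 1 - (k + 1)) + 1 by omega, List.take_succ_cons, hs]

theorem pvSegs_eq (l : List Char) : ∀ (suf : List Char) (k : Nat) (h : List Char)
    (t : List (List Char)), l.drop k = suf → pvF suf = h :: t →
    pvSegs l k (pvCutsF suf k) = String.ofList h :: t.map String.ofList := by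
  intro suf
  induction suf with
  | nil => intro k h t _ hf; simp [pvF] at hf
  | cons c suf' ih =>
    intro k h t hdrop hf
    have hdrop1 : l.drop (k + 1) = suf' := by
      rw [← List.tail_drop, hdrop, List.tail_cons]
    cases suf' with
    | nil =>
      have hfc : pvF [c] = [[c]] := by simp [pvF]
      rw [hfc] at hf; cases hf
      simp [pvCutsF, pvSegs, PySem.List.slice_from_natCast, hdrop]
    | cons d rest =>
      obtain ⟨h', t', hft⟩ := pvF_cons_exists d rest
      by_cases hp : (pvConsonants.contains c && pvConsonants.contains d) = true
      · have hfc : pvF (c :: d :: rest) = [c] :: h' :: t' := by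
          simp only [pvF, hp, if_true, hft]
        rw [hfc] at hf; cases hf
        simp only [pvCutsF, hp, if_true, List.singleton_append, pvSegs]
        have hck : ((k : Int) + 1) = ((k + 1 : Nat) : Int) := by push_cast; ring
        rw [hck, PySem.List.slice_natCast, ih (k + 1) h' t' hdrop1 hft]
        have htk : (l.drop k).take 1 = [c] := by
          rw [hdrop]; simp
        simp [htk]
      · have hfc : pvF (c :: d :: rest) = (c :: h') :: t' := by
          have hp' : (pvConsonants.contains c && pvConsonants.contains d) = false := by
            simpa using hp
          simp only [pvF, hp', Bool.false_eq_true, if_false, hft]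
        rw [hfc] at hf; cases hf
        simp only [pvCutsF, hp, Bool.false_eq_true, if_false, List.nil_append]
        exact pvSegs_shift l k c (pvCutsF (d :: rest) (k + 1))
          (by rw [hdrop, hdrop1]) (pvCutsF_ge _ (k + 1))
          h' (t.map String.ofList) (ih (k + 1) h' t hdrop1 hft)

-- ===== VERDICT (by name: the statement is the Claim_ definition above) =====
theorem split_by_consecutive_consonants_spec : Claim_equal_split_by_consecutive_consonants := by
  intro part _
  unfold Spec_split_by_consecutive_consonants split_by_consecutive_consonants
    split_by_consecutive_consonants_alt
  rcases hl : part.toList with _ | ⟨c, rest⟩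
  · simp [pvGoA]
  · simp only [reduceCtorEq, if_false]
    obtain ⟨h, t, hft⟩ := pvF_cons_exists c rest
    have hc : pvCuts (c :: rest) = pvCutsF (c :: rest) 0 := by
      unfold pvCuts; exact pvCuts_eq_aux (c :: rest) 0
    rw [pvGoA_eq (c :: rest) (c :: rest) 0 [] h t (by simp) hft, hc,
      pvSegs_eq (c :: rest) (c :: rest) 0 h t (by simp) hft]
    simp
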